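-- pv_equiv track=rewrite | github.com/Nauhai/aoc-2023 | day-14/src/util.py | count_load
-- ===== SOURCE A (Python) =====
-- def count_load(grid):
--     load = 0
--     for i in range(len(grid)):
--         rocks = 0
--         for j in range(len(grid[i])):
--             if grid[i][j] == 'O':
--                 rocks += 1
--         load += (len(grid)-i) * rocks
--     return load
-- ===== SOURCE B (Python) =====
-- def count_load(grid):
--     load = 0
--     running = 0
--     for row in grid:
--         for j in range(len(row)):
--             if row[j] == 'O':
--                 running += 1
--         load += running
--     return load
-- ===== Notes on version B (the rewrite author's own statement) =====
-- stated objective: alternative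
-- what changed: Replaces the explicit (len(grid)-i)*rocks weighting indexed by range(len(grid)) with a running prefix-count accumulator: each row's rocks are added to a running total which is then added to the load, summing prefix counts instead of multiplying by distances.
import Mathlib
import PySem

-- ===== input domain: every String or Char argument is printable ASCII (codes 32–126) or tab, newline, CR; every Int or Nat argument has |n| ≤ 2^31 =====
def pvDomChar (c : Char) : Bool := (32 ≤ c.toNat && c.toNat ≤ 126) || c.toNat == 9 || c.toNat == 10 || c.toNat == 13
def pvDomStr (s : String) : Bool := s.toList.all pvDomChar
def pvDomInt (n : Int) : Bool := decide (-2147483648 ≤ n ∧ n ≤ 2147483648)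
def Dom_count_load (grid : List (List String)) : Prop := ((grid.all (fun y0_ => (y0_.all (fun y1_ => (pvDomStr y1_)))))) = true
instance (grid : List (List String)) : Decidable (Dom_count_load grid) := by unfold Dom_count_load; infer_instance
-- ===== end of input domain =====

-- B replaces the (len(grid)-i)*rocks weighting with a running prefix-count accumulator; alternative decomposition, same cost.


-- ===== PORT A =====
-- for i in range(len(grid)): count 'O' in grid[i]; load += (len(grid)-i)*rocks
def count_load (grid : List (List String)) : Int :=
  (List.range grid.length).foldl
    (fun load i =>
      let rocks : Int :=
        (grid.getD i []).foldl (fun rocks c => if c == "O" then rocks + 1 else rocks) 0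
      load + ((grid.length : Int) - (i : Int)) * rocks)
    0

-- ===== PORT B =====
-- running prefix count of rocks; load accumulates the running total per row
def count_load_alt (grid : List (List String)) : Int :=
  (grid.foldl
    (fun (st : Int × Int) row =>
      let running := row.foldl (fun running c => if c == "O" then running + 1 else running) st.2
      (st.1 + running, running))
    (0, 0)).1

-- ===== PRECONDITION & SPEC =====
def Spec_count_load (grid : List (List String)) (out : Int) : Prop := out = count_load_alt grid
instance (grid : List (List String)) (out : Int) : Decidable (Spec_count_load grid out) := by unfold Spec_count_load; infer_instance

-- ===== CLAIM (what is proved, stated in full; the proofs are below) =====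
def Claim_equal_count_load : Prop := ∀ (grid : List (List String)), Dom_count_load grid → Spec_count_load grid (count_load grid)

-- ===== LEMMAS AND PROOFS =====

-- rock count of one row (abstract form used by the proofs)
def pvRocks (row : List String) : Int :=
  row.foldl (fun r c => if c == "O" then r + 1 else r) 0

-- weighted sum with decreasing weight starting at w
def pvWSum (g : List (List String)) (w : Int) : Int :=
  match g with
  | [] => 0
  | r :: rs => w * pvRocks r + pvWSum rs (w - 1)

def pvTSum (g : List (List String)) : Int :=
  match g with
  | [] => 0
  | r :: rs => pvRocks r + pvTSum rs

theorem pvRocks_shift (row : List String) (a : Int) :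
    row.foldl (fun r c => if c == "O" then r + 1 else r) a = a + pvRocks row := by
  induction row generalizing a with
  | nil => simp [pvRocks]
  | cons c cs ih =>
    simp only [List.foldl_cons, pvRocks]
    rw [ih, ih ((if c == "O" then (0:Int) + 1 else 0))]
    split <;> ring

theorem countA_fold (g : List (List String)) (acc w : Int) :
    (List.range g.length).foldl
      (fun load i =>
        let rocks : Int :=
          (g.getD i []).foldl (fun rocks c => if c == "O" then rocks + 1 else rocks) 0
        load + (w - (i : Int)) * rocks) acc
    = acc + pvWSum g w := by
  induction g generalizing acc w with
  | nil => simp [pvWSum]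
  | cons r rs ih =>
    simp only [List.length_cons, List.range_succ_eq_map, List.foldl_cons, List.foldl_map,
      List.getD_cons_zero, List.getD_cons_succ]
    have h := ih (acc + (w - (0 : Int)) * ((r.foldl (fun rocks c => if c == "O" then rocks + 1 else rocks) 0))) (w - 1)
    simp only [Nat.cast_zero, sub_zero] at *
    rw [show (fun (load : Int) (i : Nat) =>
        load + (w - ((i + 1 : Nat) : Int)) *
          (rs.getD i []).foldl (fun rocks c => if c == "O" then rocks + 1 else rocks) 0)
      = (fun (load : Int) (i : Nat) =>
        load + ((w - 1) - (i : Int)) *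
          (rs.getD i []).foldl (fun rocks c => if c == "O" then rocks + 1 else rocks) 0) from by
      funext load i; push_cast; ring_nf]
    rw [ih]
    have hr : (r.foldl (fun rocks c => if c == "O" then rocks + 1 else rocks) 0) = pvRocks r := rfl
    simp only [pvWSum, hr]
    ring

theorem countB_fold (g : List (List String)) (l r : Int) :
    g.foldl
      (fun (st : Int × Int) row =>
        let running := row.foldl (fun running c => if c == "O" then running + 1 else running) st.2
        (st.1 + running, running))
      (l, r)
    = (l + (g.length : Int) * r + pvWSum g (g.length : Int), r + pvTSum g) := by
  induction g generalizing l r with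
  | nil => simp [pvWSum, pvTSum]
  | cons row rs ih =>
    simp only [List.foldl_cons]
    rw [pvRocks_shift]
    rw [ih]
    simp only [pvWSum, pvTSum, List.length_cons]
    refine Prod.ext ?_ ?_ <;> simp <;> push_cast <;> try ring

-- ===== VERDICT (by name: the statement is the Claim_ definition above) =====
theorem count_load_spec : Claim_equal_count_load := by
  intro grid _
  unfold Spec_count_load count_load count_load_alt
  rw [countA_fold, countB_fold]
  simp
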